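-- pv_equiv track=rewrite | github.com/TabeaHeckenthaler/AntsShapes | Analysis/back_room_flipping/back_room_flipping.py | reduce_decisions
-- ===== SOURCE A (Python) =====
-- def reduce_decisions(decisions, min_time=20):
--     decisions = [decisions[0]] + [d if d[1] > min_time else (None, d[1]) for d in decisions[1:]]
--
--     decisions_reduced = [decisions[0]]
--     # add up the second element all successive pairs with the same first element
--     for d2 in decisions[1:]:
--         d1 = decisions_reduced[-1]
--         if d2[0] is None:
--             decisions_reduced[-1] = (d1[0], d1[1] + d2[1])
--         elif d1[0] == d2[0]:
--             decisions_reduced[-1] = (d1[0], d1[1] + d2[1])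
--         else:
--             decisions_reduced.append(d2)
--     return decisions_reduced
-- ===== SOURCE B (Python) =====
-- def reduce_decisions(decisions, min_time=20):
--     # Group-then-summarize: first materialize the runs as explicit sublists,
--     # then map each run to (label of its first entry, total time).
--     segments = [[decisions[0]]]
--     for d in decisions[1:]:
--         name, t = d
--         if t > min_time and name is not None and name != segments[-1][0][0]:
--             segments.append([d])
--         else:
--             segments[-1].append(d)
--     return [(seg[0][0], sum(t for _, t in seg)) for seg in segments]
-- ===== Notes on version B (the rewrite author's own statement) =====
-- stated objective: alternative
-- what changed: B replaces A's None-masking preprocessing plus in-place pair-merging loop by a group-then-summarize scheme: it materializes the runs as explicit sublists and then maps each run to (first label, sum of times).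
import Mathlib
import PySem

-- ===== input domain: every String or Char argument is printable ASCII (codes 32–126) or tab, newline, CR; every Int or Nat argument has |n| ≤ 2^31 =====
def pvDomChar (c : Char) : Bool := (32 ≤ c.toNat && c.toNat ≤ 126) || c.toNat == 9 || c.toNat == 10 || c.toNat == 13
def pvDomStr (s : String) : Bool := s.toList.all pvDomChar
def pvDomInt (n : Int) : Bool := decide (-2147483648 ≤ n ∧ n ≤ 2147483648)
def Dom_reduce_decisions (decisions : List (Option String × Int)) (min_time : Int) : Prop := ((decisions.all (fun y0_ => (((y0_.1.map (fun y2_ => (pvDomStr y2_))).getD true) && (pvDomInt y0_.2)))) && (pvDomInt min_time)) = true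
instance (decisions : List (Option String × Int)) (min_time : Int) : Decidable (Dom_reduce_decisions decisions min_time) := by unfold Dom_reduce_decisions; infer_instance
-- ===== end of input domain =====

-- B replaces A's mask-then-merge pass by group-then-summarize (explicit run sublists, then a summarizing map); same output.
-- Pre_ excludes only the empty list, on which A raises IndexError (decisions[0]).


-- ===== PORT A =====
-- the for-loop of A: state is the last element of decisions_reduced, the finished
-- prefix is emitted in front
def reduceLoopA (d1 : Option String × Int) : List (Option String × Int) → List (Option String × Int)
  | [] => [d1]
  | d2 :: rest =>
    if d2.1 = none then reduceLoopA (d1.1, d1.2 + d2.2) rest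
    else if d1.1 = d2.1 then reduceLoopA (d1.1, d1.2 + d2.2) rest
    else d1 :: reduceLoopA d2 rest

def reduce_decisions (decisions : List (Option String × Int)) (min_time : Int) : List (Option String × Int) :=
  match decisions with
  | [] => []  -- Python raises IndexError here (outside Pre_)
  | d0 :: rest =>
    let masked := rest.map (fun d => if d.2 > min_time then d else (none, d.2))
    reduceLoopA d0 masked

-- ===== PORT B =====
-- Python's `segments` list is the pair (finished segments, segments[-1])
def segStep (min_time : Int) (st : List (List (Option String × Int)) × List (Option String × Int))
    (d : Option String × Int) : List (List (Option String × Int)) × List (Option String × Int) :=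
  if d.2 > min_time ∧ d.1 ≠ none ∧ (st.2.headD (none, 0)).1 ≠ d.1 then
    (st.1 ++ [st.2], [d])
  else
    (st.1, st.2 ++ [d])

-- (seg[0][0], sum(t for _, t in seg)); seg is never empty, headD is exact
def summB (seg : List (Option String × Int)) : Option String × Int :=
  ((seg.headD (none, 0)).1, seg.foldl (fun a d => a + d.2) 0)

def reduce_decisions_alt (decisions : List (Option String × Int)) (min_time : Int) : List (Option String × Int) :=
  match decisions with
  | [] => []  -- Python raises IndexError here (outside Pre_)
  | d0 :: rest =>
    let r := rest.foldl (segStep min_time) ([], [d0])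
    (r.1 ++ [r.2]).map summB

-- ===== PRECONDITION & SPEC =====
def Pre_reduce_decisions (decisions : List (Option String × Int)) (min_time : Int) : Prop := decisions ≠ []
instance (decisions : List (Option String × Int)) (min_time : Int) : Decidable (Pre_reduce_decisions decisions min_time) := by unfold Pre_reduce_decisions; infer_instance
def pvWitness_reduce_decisions : (List (Option String × Int)) × Int := ([(some "a", 30), (some "b", 5), (some "b", 40)], 20)
def Spec_reduce_decisions (decisions : List (Option String × Int)) (min_time : Int) (out : List (Option String × Int)) : Prop := out = reduce_decisions_alt decisions min_time
instance (decisions : List (Option String × Int)) (min_time : Int) (out : List (Option String × Int)) : Decidable (Spec_reduce_decisions decisions min_time out) := by unfold Spec_reduce_decisions; infer_instance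

-- ===== CLAIM (what is proved, stated in full; the proofs are below) =====
def Claim_equal_reduce_decisions : Prop := ∀ (decisions : List (Option String × Int)) (min_time : Int), Dom_reduce_decisions decisions min_time → Pre_reduce_decisions decisions min_time → Spec_reduce_decisions decisions min_time (reduce_decisions decisions min_time)

-- ===== LEMMAS AND PROOFS =====

-- extending the current run: head unchanged, sum grows by d.2
theorem summB_append (c : Option String × Int) (cs : List (Option String × Int)) (d : Option String × Int) :
    summB ((c :: cs) ++ [d]) = ((summB (c :: cs)).1, (summB (c :: cs)).2 + d.2) := by
  simp [summB, List.foldl_append]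

-- the invariant: A's recursion over the masked rest, with accumulator = the summary of
-- the current run, equals B's group-then-summarize continued from (fin, current run)
theorem seg_agree (min_time : Int) (rest : List (Option String × Int)) :
    ∀ (fin : List (List (Option String × Int))) (c : Option String × Int) (cs : List (Option String × Int)),
    fin.map summB ++ reduceLoopA (summB (c :: cs)) (rest.map (fun d => if d.2 > min_time then d else (none, d.2)))
      = ((rest.foldl (segStep min_time) (fin, c :: cs)).1 ++ [(rest.foldl (segStep min_time) (fin, c :: cs)).2]).map summB := by
  induction rest with
  | nil => intro fin c cs; simp [reduceLoopA]
  | cons d rest ih =>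
    intro fin c cs
    simp only [List.map_cons, List.foldl_cons, segStep, List.headD_cons]
    by_cases hgt : d.2 > min_time
    · rw [if_pos hgt]
      by_cases hn : d.1 = none
      · -- long but unnamed entry: A's first branch merges, B extends the run
        rw [if_neg (by simp [hn]),
          show reduceLoopA (summB (c :: cs)) (d :: rest.map (fun d => if d.2 > min_time then d else (none, d.2)))
              = reduceLoopA ((summB (c :: cs)).1, (summB (c :: cs)).2 + d.2) (rest.map (fun d => if d.2 > min_time then d else (none, d.2)))
            from by simp [reduceLoopA, hn],
          ← summB_append c cs d]
        exact ih fin c (cs ++ [d])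
      · by_cases hne : c.1 = d.1
        · -- same label: A's second branch merges, B extends the run
          have h1 : (summB (c :: cs)).1 = d.1 := by simpa [summB] using hne
          rw [if_neg (by simp [hne]),
            show reduceLoopA (summB (c :: cs)) (d :: rest.map (fun d => if d.2 > min_time then d else (none, d.2)))
                = reduceLoopA ((summB (c :: cs)).1, (summB (c :: cs)).2 + d.2) (rest.map (fun d => if d.2 > min_time then d else (none, d.2)))
              from by simp [reduceLoopA, hn, h1],
            ← summB_append c cs d]
          exact ih fin c (cs ++ [d])
        · -- break: A emits the current summary, B closes the run
          have h1 : (summB (c :: cs)).1 ≠ d.1 := by simpa [summB] using hne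
          rw [if_pos (show d.2 > min_time ∧ d.1 ≠ none ∧ c.1 ≠ d.1 from ⟨hgt, hn, hne⟩),
            show reduceLoopA (summB (c :: cs)) (d :: rest.map (fun d => if d.2 > min_time then d else (none, d.2)))
                = summB (c :: cs) :: reduceLoopA d (rest.map (fun d => if d.2 > min_time then d else (none, d.2)))
              from by simp [reduceLoopA, hn, h1]]
          have := ih (fin ++ [c :: cs]) d []
          rw [show summB [d] = d from by simp [summB]] at this
          simpa using this
    · -- short entry: A masks it to (none, ·) and merges, B extends the run
      rw [if_neg hgt, if_neg (by simp [hgt]),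
        show reduceLoopA (summB (c :: cs)) (((none : Option String), d.2) :: rest.map (fun d => if d.2 > min_time then d else (none, d.2)))
            = reduceLoopA ((summB (c :: cs)).1, (summB (c :: cs)).2 + d.2) (rest.map (fun d => if d.2 > min_time then d else (none, d.2)))
          from by simp [reduceLoopA],
        ← summB_append c cs d]
      exact ih fin c (cs ++ [d])

-- ===== VERDICT (by name: the statement is the Claim_ definition above) =====
theorem reduce_decisions_spec : Claim_equal_reduce_decisions := by
  intro decisions min_time _ hpre
  unfold Spec_reduce_decisions reduce_decisions reduce_decisions_alt
  match decisions with
  | [] => exact absurd rfl hpre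
  | d0 :: rest =>
    have hd0 : summB [d0] = d0 := by simp [summB]
    have := seg_agree min_time rest [] d0 []
    rw [hd0] at this
    simpa using this
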